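-- pv_equiv track=rewrite | github.com/vigneshsabapathi/python-algorithms | ciphers/rsa_cipher.py | get_blocks_from_text
-- ===== SOURCE A (Python) =====
-- DEFAULT_BLOCK_SIZE = 128
--
-- BYTE_SIZE = 256
--
-- def get_blocks_from_text(
--     message: str, block_size: int = DEFAULT_BLOCK_SIZE
-- ) -> list[int]:
--     """
--     Convert a message string to a list of block integers.
--
--     >>> get_blocks_from_text("Hello", block_size=5)
--     [478560413000]
--     """
--     message_bytes = message.encode("ascii")
--     block_ints = []
--     for block_start in range(0, len(message_bytes), block_size):
--         block_int = 0
--         for i in range(block_start, min(block_start + block_size, len(message_bytes))):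
--             block_int += message_bytes[i] * (BYTE_SIZE ** (i % block_size))
--         block_ints.append(block_int)
--     return block_ints
-- ===== SOURCE B (Python) =====
-- DEFAULT_BLOCK_SIZE = 128
--
--
-- def get_blocks_from_text(
--     message: str, block_size: int = DEFAULT_BLOCK_SIZE
-- ) -> list[int]:
--     message_bytes = message.encode("ascii")
--     return [
--         int.from_bytes(message_bytes[block_start : block_start + block_size], "little")
--         for block_start in range(0, len(message_bytes), block_size)
--     ]
-- ===== Notes on version B (the rewrite author's own statement) =====
-- stated objective: idiomatic
-- what changed: The inner per-byte weighted-power accumulation loop (256**(i % block_size) recomputed per byte) is replaced by slicing the byte string per block and converting each slice with int.from_bytes(..., 'little') in a single comprehension.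
import Mathlib
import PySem

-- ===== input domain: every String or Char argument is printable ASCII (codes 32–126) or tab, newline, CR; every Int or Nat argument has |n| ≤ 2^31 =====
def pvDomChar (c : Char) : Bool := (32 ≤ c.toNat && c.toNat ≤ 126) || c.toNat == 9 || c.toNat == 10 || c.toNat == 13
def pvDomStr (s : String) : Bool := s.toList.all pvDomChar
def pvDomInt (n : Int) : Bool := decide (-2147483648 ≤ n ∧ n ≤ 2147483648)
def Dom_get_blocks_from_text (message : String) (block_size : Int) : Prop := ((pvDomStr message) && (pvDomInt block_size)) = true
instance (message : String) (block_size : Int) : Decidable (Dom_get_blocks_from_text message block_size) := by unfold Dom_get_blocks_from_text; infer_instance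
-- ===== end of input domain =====

-- B replaces A's inner per-byte weighted-power accumulation with per-block slicing plus a
-- little-endian bytes-to-int conversion (int.from_bytes), as a single comprehension.

-- ===== PORT A =====
-- message.encode("ascii"): under Dom_ every char is ASCII, so this is the list of code points.
def get_blocks_from_text (message : String) (block_size : Int) : List Int :=
  let message_bytes : List Int := message.toList.map (fun c => (c.toNat : Int))
  (PySem.List.pyRange 0 message_bytes.length block_size).foldl
    (fun block_ints block_start =>
      let block_int :=
        (PySem.List.pyRange block_start
            (min (block_start + block_size) (message_bytes.length : Int)) 1).foldl
          (fun bi i =>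
            bi + PySem.List.pyGetD message_bytes i 0 *
              256 ^ (PySem.Int.mod i block_size).toNat) 0
      block_ints ++ [block_int]) []

-- ===== PORT B =====
-- int.from_bytes(bs, "little"): little-endian base-256 value of the byte list.
def fromBytesLE (bs : List Int) : Int := bs.foldr (fun b acc => b + 256 * acc) 0

def get_blocks_from_text_alt (message : String) (block_size : Int) : List Int :=
  let message_bytes : List Int := message.toList.map (fun c => (c.toNat : Int))
  (PySem.List.pyRange 0 message_bytes.length block_size).map
    (fun block_start =>
      fromBytesLE (PySem.List.slice message_bytes (some block_start)
        (some (block_start + block_size))))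

-- ===== PRECONDITION & SPEC =====
-- Pre_ excludes only block_size = 0, where Python's range(0, n, 0) raises ValueError (in A and in B alike).
def Pre_get_blocks_from_text (message : String) (block_size : Int) : Prop := block_size ≠ 0
instance (message : String) (block_size : Int) : Decidable (Pre_get_blocks_from_text message block_size) := by unfold Pre_get_blocks_from_text; infer_instance
def pvWitness_get_blocks_from_text : String × Int := ("Hello", 5)

def Spec_get_blocks_from_text (message : String) (block_size : Int) (out : List Int) : Prop := out = get_blocks_from_text_alt message block_size
instance (message : String) (block_size : Int) (out : List Int) : Decidable (Spec_get_blocks_from_text message block_size out) := by unfold Spec_get_blocks_from_text; infer_instance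

-- ===== CLAIM (what is proved, stated in full; the proofs are below) =====
def Claim_equal_get_blocks_from_text : Prop := ∀ (message : String) (block_size : Int), Dom_get_blocks_from_text message block_size → Pre_get_blocks_from_text message block_size → Spec_get_blocks_from_text message block_size (get_blocks_from_text message block_size)

-- ===== LEMMAS AND PROOFS =====

-- A's inner weighted-sum loop over one block equals B's little-endian value of the slice,
-- generalized over the slice list l, the running start index s, and the weight offset r.
theorem inner_fold_eq (mb : List Int) (bs : Int)
    (l : List Int) (s : Int) (r : Nat) (c : Int)
    (hget : ∀ k : Nat, k < l.length → l.getD k 0 = PySem.List.pyGetD mb (s + k) 0)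
    (hmod : ∀ k : Nat, k < l.length → PySem.Int.mod (s + k) bs = (r + k : Nat)) :
    (PySem.List.pyRange s (s + l.length) 1).foldl
      (fun bi i => bi + PySem.List.pyGetD mb i 0 * 256 ^ (PySem.Int.mod i bs).toNat) c
    = c + 256 ^ r * fromBytesLE l := by
  induction l generalizing s r c with
  | nil =>
    rw [PySem.List.pyRange_one_eq_nil (by simp)]
    simp [fromBytesLE]
  | cons x t ih =>
    rw [PySem.List.pyRange_one_cons (by push_cast [List.length_cons]; omega)]
    simp only [List.foldl_cons]
    have hx : PySem.List.pyGetD mb s 0 = x := by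
      have := hget 0 (by simp)
      simpa using this.symm
    have hm0 : PySem.Int.mod s bs = (r : Int) := by
      have := hmod 0 (by simp)
      simpa using this
    have hrest :
        (PySem.List.pyRange (s + 1) (s + ↑(x :: t).length) 1).foldl
          (fun bi i => bi + PySem.List.pyGetD mb i 0 * 256 ^ (PySem.Int.mod i bs).toNat)
          (c + PySem.List.pyGetD mb s 0 * 256 ^ (PySem.Int.mod s bs).toNat)
        = (c + PySem.List.pyGetD mb s 0 * 256 ^ (PySem.Int.mod s bs).toNat)
            + 256 ^ (r + 1) * fromBytesLE t := by
      have hlen : s + ((x :: t).length : Int) = (s + 1) + (t.length : Int) := by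
        push_cast [List.length_cons]; ring
      rw [hlen]
      exact ih (s + 1) (r + 1) _
        (fun k hk => by
          have := hget (k + 1) (by simpa using Nat.succ_lt_succ hk)
          simpa [add_assoc, add_comm, add_left_comm] using this)
        (fun k hk => by
          have := hmod (k + 1) (by simpa using Nat.succ_lt_succ hk)
          push_cast at this ⊢
          rw [show s + 1 + (k : Int) = s + ((k : Int) + 1) by ring]
          rw [this]; ring)
    rw [hrest, hx, hm0]
    simp only [fromBytesLE, List.foldr_cons]
    have : ((r : Int)).toNat = r := by simp
    rw [this]
    show c + x * 256 ^ r + 256 ^ (r + 1) * (t.foldr (fun b acc => b + 256 * acc) 0)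
        = c + 256 ^ r * (x + 256 * (t.foldr (fun b acc => b + 256 * acc) 0))
    ring

-- one block: A's inner loop value = B's fromBytesLE of the slice, for a block start s
-- that is a nonnegative multiple of bs below the length.
theorem block_eq (mb : List Int) (bs : Int) (hbs : 0 < bs) (s : Int)
    (hs0 : 0 ≤ s) (hsn : s < (mb.length : Int)) (hdvd : bs ∣ s) :
    (PySem.List.pyRange s (min (s + bs) (mb.length : Int)) 1).foldl
      (fun bi i => bi + PySem.List.pyGetD mb i 0 * 256 ^ (PySem.Int.mod i bs).toNat) 0
    = fromBytesLE (PySem.List.slice mb (some s) (some (s + bs))) := by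
  set l : List Int := PySem.List.slice mb (some s) (some (s + bs)) with hl
  have hslice : l = List.take ((s + bs).toNat - s.toNat) (List.drop s.toNat mb) := by
    rw [hl, PySem.List.slice_toNat mb hs0 (by omega)]
  have hlen : l.length = min ((s + bs).toNat - s.toNat) (mb.length - s.toNat) := by
    rw [hslice]; simp
  have hmin : min (s + bs) (mb.length : Int) = s + (l.length : Int) := by
    rw [hlen]; omega
  have hklt : ∀ k : Nat, k < l.length → (s + (k : Int)) < (mb.length : Int) := by
    intro k hk; rw [hlen] at hk; omega
  rw [hmin]
  rw [inner_fold_eq mb bs l s 0 0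
    (by
      intro k hk
      have hk' : s.toNat + k < mb.length := by
        have := hklt k hk; omega
      rw [hslice]
      rw [List.getD_eq_getElem?_getD]
      rw [List.getElem?_take_of_lt (by rw [hslice] at hk; simp at hk; exact hk.1)]
      rw [List.getElem?_drop]
      rw [List.getElem?_eq_getElem hk']
      rw [PySem.List.pyGetD_eq_getElem mb 0 (by omega) (by exact hklt k hk)]
      simp
      congr 1
      omega)
    (by
      intro k hk
      obtain ⟨q, hq⟩ := hdvd
      have hkbs : (k : Int) < bs := by
        rw [hlen] at hk; omega
      have : PySem.Int.mod (s + k) bs = (s + k) % bs :=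
        PySem.Int.mod_eq_emod_of_pos hbs
      rw [this, hq, add_comm, Int.add_mul_emod_self_left]
      rw [Int.emod_eq_of_lt (by positivity) hkbs]
      simp)]
  simp

-- negative step: range(0, n, bs) is empty for n ≥ 0
theorem pyRange_zero_nonneg_neg_step (n bs : Int) (hn : 0 ≤ n) (hbs : bs < 0) :
    PySem.List.pyRange 0 n bs = [] := by
  unfold PySem.List.pyRange
  rw [if_neg (by omega)]
  rw [if_neg (by omega), if_neg (by omega)]
  simp

-- ===== VERDICT (by name: the statement is the Claim_ definition above) =====
theorem get_blocks_from_text_spec : Claim_equal_get_blocks_from_text := by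
  intro message block_size _hdom hpre
  unfold Spec_get_blocks_from_text get_blocks_from_text get_blocks_from_text_alt
  dsimp only
  set mb : List Int := message.toList.map (fun c => (c.toNat : Int)) with hmb
  rcases lt_trichotomy block_size 0 with hneg | hzero | hpos
  · rw [pyRange_zero_nonneg_neg_step _ _ (Int.natCast_nonneg _) hneg]
    simp
  · exact absurd hzero hpre
  · rw [PySem.List.foldl_append_singleton_eq_map]
    simp only [List.nil_append]
    apply List.map_congr_left
    intro s hs
    rw [PySem.List.mem_pyRange_iff_of_pos hpos] at hs
    obtain ⟨hs0, hsn, hdvd⟩ := hs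
    rw [sub_zero] at hdvd
    exact block_eq mb block_size hpos s hs0 hsn hdvd
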